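-- pv_equiv track=rewrite | github.com/jihyeong2/TIL | programmers/Code/게임아이템.py | solution
-- ===== SOURCE A (Python) =====
-- import heapq
-- from collections import deque
--
-- def solution(healths, items):
--     answer = []
--     max_heap = []
--     items = deque(sorted([(item[1], item[0], idx+1) for idx,item in enumerate(items)]))
--
--     healths.sort()
--     for health in healths :
--         while items and health - items[0][0] >= 100:
--             item = items.popleft()
--             heapq.heappush(max_heap,(-item[1], item[2]))
--         if max_heap:
--             answer.append(heapq.heappop(max_heap)[1])
--     return sorted(answer)
-- ===== SOURCE B (Python) =====
-- def solution(healths, items):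
--     healths.sort()
--     used = [False] * len(items)
--     answer = []
--     for health in healths:
--         best, best_atk = -1, 0
--         for i, item in enumerate(items):
--             if not used[i] and health - item[1] >= 100 and (best == -1 or item[0] > best_atk):
--                 best, best_atk = i, item[0]
--         if best != -1:
--             used[best] = True
--             answer.append(best + 1)
--     return sorted(answer)
-- ===== Notes on version B (the rewrite author's own statement) =====
-- stated objective: simpler
-- what changed: Replaces the cost-sorted deque + max-heap two-pointer machinery with a plain greedy: for each health (ascending) a single linear scan over the items picks the unused affordable item with maximal attack (first index on ties) via a used[] boolean array; no sorting of items, no heap.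
import Mathlib
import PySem

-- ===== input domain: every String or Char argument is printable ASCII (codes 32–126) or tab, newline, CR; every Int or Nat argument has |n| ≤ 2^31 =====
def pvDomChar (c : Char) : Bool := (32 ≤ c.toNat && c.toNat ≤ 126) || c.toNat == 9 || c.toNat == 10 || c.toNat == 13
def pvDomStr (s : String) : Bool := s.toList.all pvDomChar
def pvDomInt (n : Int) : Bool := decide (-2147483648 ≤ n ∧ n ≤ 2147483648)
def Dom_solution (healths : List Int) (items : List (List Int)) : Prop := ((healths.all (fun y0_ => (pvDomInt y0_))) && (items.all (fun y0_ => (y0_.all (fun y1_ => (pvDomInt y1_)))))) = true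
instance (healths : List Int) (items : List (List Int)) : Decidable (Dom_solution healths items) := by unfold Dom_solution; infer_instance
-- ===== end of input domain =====

-- B replaces A's cost-sorted deque + max-heap with per-health linear scans over a used[]
-- array (objective: simpler).  Both A and B sort `healths` in place (same side effect);
-- the equivalence proved here is about the return value.

-- ===== PORT A =====
-- the list [(item[1], item[0], idx+1) for idx, item in enumerate(items)]
def pvTri (items : List (List Int)) : List (Int × Int × Int) :=
  (PySem.List.enumerate items).map
    (fun p => (PySem.List.pyGetD p.2 1 0, PySem.List.pyGetD p.2 0 0, p.1 + 1))

-- sorted(...) on the 3-tuples: the third component (idx) strictly increases along the build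
-- order, so the stable two-key sort on (cost, attack) equals Python's 3-tuple sort exactly
def pvTriS (items : List (List Int)) : List (Int × Int × Int) :=
  PySem.List.sorted2 (pvTri items) (fun t => t.1) (fun t => t.2.1)

-- the 'while' loop: pop affordable items off the deque front, pushing (-attack, idx)
def pvPush (h : Int) : List (Int × Int × Int) → List (Int × Int) → List (Int × Int × Int) × List (Int × Int)
  | [], heap => ([], heap)
  | t :: rest, heap =>
    if h - t.1 ≥ 100 then pvPush h rest (heap ++ [(-t.2.1, t.2.2)]) else (t :: rest, heap)

-- heapq is ported by its value contract: the heap is the multiset of pushed-not-popped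
-- pairs (push = append); heappop removes and returns the lexicographically minimal pair
def pvStepA (st : List (Int × Int × Int) × List (Int × Int) × List Int) (h : Int) :
    List (Int × Int × Int) × List (Int × Int) × List Int :=
  let s := pvPush h st.1 st.2.1
  match PySem.List.min2? s.2 (fun p => p.1) (fun p => p.2) with
  | none => (s.1, s.2, st.2.2)
  | some m => (s.1, s.2.erase m, st.2.2 ++ [m.2])

def solution (healths : List Int) (items : List (List Int)) : List Int :=
  let st := (PySem.List.sorted healths (fun x => x)).foldl pvStepA (pvTriS items, [], [])
  PySem.List.sorted st.2.2 (fun x => x)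

-- ===== PORT B =====
-- the inner scan: (best, best_atk) after the for-loop over enumerate(items)
-- (Source B's single 'and' chain is transcribed as the equivalent nested ifs: the trailing
-- conjunct reads the accumulator, the leading ones do not)
def pvScan (items : List (List Int)) (used : List Bool) (health : Int) : Int × Int :=
  (PySem.List.enumerate items).foldl
    (fun bb p =>
      if !(PySem.List.pyGetD used p.1 false) && decide (health - PySem.List.pyGetD p.2 1 0 ≥ 100) then
        if bb.1 == -1 || decide (PySem.List.pyGetD p.2 0 0 > bb.2) then
          (p.1, PySem.List.pyGetD p.2 0 0)
        else bb
      else bb)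
    (-1, 0)

def pvStepB (items : List (List Int)) (st : List Bool × List Int) (health : Int) : List Bool × List Int :=
  let b := pvScan items st.1 health
  if b.1 ≠ -1 then (PySem.List.pySetD st.1 b.1 true, st.2 ++ [b.1 + 1]) else st

def solution_alt (healths : List Int) (items : List (List Int)) : List Int :=
  let st := (PySem.List.sorted healths (fun x => x)).foldl (pvStepB items)
    (List.replicate items.length false, [])
  PySem.List.sorted st.2 (fun x => x)

-- ===== PRECONDITION & SPEC =====
-- Pre_ excludes exactly the inputs where Python A raises IndexError (an item with fewer
-- than two entries); B raises there too.
def Pre_solution (healths : List Int) (items : List (List Int)) : Prop :=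
  ∀ it ∈ items, 2 ≤ it.length
instance (healths : List Int) (items : List (List Int)) : Decidable (Pre_solution healths items) := by
  unfold Pre_solution; infer_instance

def pvWitness_solution : List Int × List (List Int) := ([103, 200], [[5, 3], [4, 100]])

def Spec_solution (healths : List Int) (items : List (List Int)) (out : List Int) : Prop := out = solution_alt healths items
instance (healths : List Int) (items : List (List Int)) (out : List Int) : Decidable (Spec_solution healths items out) := by unfold Spec_solution; infer_instance

-- ===== CLAIM (what is proved, stated in full; the proofs are below) =====
def Claim_equal_solution : Prop := ∀ (healths : List Int) (items : List (List Int)), Dom_solution healths items → Pre_solution healths items → Spec_solution healths items (solution healths items)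

-- ===== LEMMAS AND PROOFS =====

-- abbreviations for the proof
def pvNeg (t : Int × Int × Int) : Int × Int := (-t.2.1, t.2.2)
def pvAff (h : Int) (t : Int × Int × Int) : Bool := decide (h - t.1 ≥ 100)
def pvAvail (used : List Bool) (t : Int × Int × Int) : Bool :=
  !(PySem.List.pyGetD used (t.2.2 - 1) false)
-- strict lexicographic order on Int pairs (what heapq's pop minimises)
def pvLex (a b : Int × Int) : Prop := a.1 < b.1 ∨ (a.1 = b.1 ∧ a.2 < b.2)

lemma pvPush_eq (h : Int) (dq : List (Int × Int × Int)) (heap : List (Int × Int)) :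
    pvPush h dq heap = (dq.dropWhile (pvAff h), heap ++ (dq.takeWhile (pvAff h)).map pvNeg) := by
  induction dq generalizing heap with
  | nil => simp [pvPush]
  | cons t rest ih =>
    by_cases hc : h - t.1 ≥ 100
    · simp [pvPush, hc, pvAff, ih, pvNeg]
    · simp [pvPush, hc, pvAff]

lemma span_filter {α : Type} (p : α → Bool) (R : α → α → Prop)
    (hmono : ∀ a b, R a b → p b = true → p a = true) :
    ∀ l : List α, l.Pairwise R →
      l.takeWhile p = l.filter p ∧ l.dropWhile p = l.filter (fun x => !p x) := by
  intro l hl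
  induction l with
  | nil => simp
  | cons a l ih =>
    rcases List.pairwise_cons.mp hl with ⟨ha, hl'⟩
    by_cases hp : p a = true
    · simp [hp, (ih hl').1, (ih hl').2]
    · have h0 : p a = false := by simpa using hp
      have hall : ∀ x ∈ l, p x = false := by
        intro x hx
        cases hpx : p x with
        | false => rfl
        | true => exact absurd (hmono a x (ha x hx) hpx) (by simp [h0])
      constructor
      · simp only [List.takeWhile_cons, h0, List.filter_cons]
        rw [List.filter_eq_nil_iff.mpr (by intro x hx; simp [hall x hx])]
        simp [h0]
      · simp only [List.dropWhile_cons, h0, List.filter_cons]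
        rw [List.filter_eq_self.mpr (by intro x hx; simp [hall x hx])]
        simp

lemma pairwise_insertBy {α : Type} {R : α → α → Prop} {before : α → α → Bool}
    (h1 : ∀ a b, before a b = true → R a b) (h2 : ∀ a b, before a b = false → R b a)
    (ht : ∀ a b c, R a b → R b c → R a c) (x : α) :
    ∀ l : List α, l.Pairwise R → (PySem.List.insertBy before x l).Pairwise R := by
  intro l hl
  induction l with
  | nil => simp [PySem.List.insertBy]
  | cons y ys ih =>
    rcases List.pairwise_cons.mp hl with ⟨hy, hys⟩
    by_cases hb : before x y = true
    · rw [show PySem.List.insertBy before x (y :: ys) = x :: y :: ys by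
        simp [PySem.List.insertBy, hb]]
      refine List.pairwise_cons.mpr ⟨?_, hl⟩
      intro z hz
      rcases List.mem_cons.mp hz with rfl | hz
      · exact h1 _ _ hb
      · exact ht _ _ _ (h1 _ _ hb) (hy z hz)
    · rw [show PySem.List.insertBy before x (y :: ys) = y :: PySem.List.insertBy before x ys by
        simp [PySem.List.insertBy, hb]]
      refine List.pairwise_cons.mpr ⟨?_, ih hys⟩
      intro z hz
      rcases (PySem.List.mem_insertBy before x z ys).mp hz with rfl | hz
      · exact h2 _ _ (by simpa using hb)
      · exact hy z hz

-- pvTriS is pairwise nondecreasing in (cost, attack) lex order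
lemma pvTriS_pairwise (items : List (List Int)) :
    (pvTriS items).Pairwise
      (fun a b => a.1 < b.1 ∨ (a.1 = b.1 ∧ a.2.1 ≤ b.2.1)) := by
  unfold pvTriS PySem.List.sorted2
  simp only [if_neg (by decide : ¬ (false = true))]
  generalize pvTri items = l
  have key : ∀ (l : List (Int × Int × Int)) (acc : List (Int × Int × Int)),
      acc.Pairwise (fun a b => a.1 < b.1 ∨ (a.1 = b.1 ∧ a.2.1 ≤ b.2.1)) →
      (l.foldl (fun acc x => PySem.List.insertBy
        (fun a b => decide (a.1 < b.1) || (!decide (b.1 < a.1) && decide (a.2.1 < b.2.1)))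
        x acc) acc).Pairwise (fun a b => a.1 < b.1 ∨ (a.1 = b.1 ∧ a.2.1 ≤ b.2.1)) := by
    intro l
    induction l with
    | nil => intro acc h; exact h
    | cons x l ih =>
      intro acc h
      refine ih _ (pairwise_insertBy ?_ ?_ ?_ x acc h)
      · intro a b hb
        simp only [Bool.or_eq_true, Bool.and_eq_true, Bool.not_eq_true',
          decide_eq_true_eq, decide_eq_false_iff_not] at hb
        omega
      · intro a b hb
        simp only [Bool.or_eq_false_iff, Bool.and_eq_false_iff, Bool.not_eq_false',
          decide_eq_false_iff_not, decide_eq_true_eq] at hb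
        omega
      · intro a b c hab hbc; omega
  exact key _ [] (by simp)

lemma pvTriS_pairwise_cost (items : List (List Int)) :
    (pvTriS items).Pairwise (fun a b => a.1 ≤ b.1) := by
  exact (pvTriS_pairwise items).imp (by intro a b h; omega)

lemma pvTriS_perm (items : List (List Int)) : (pvTriS items).Perm (pvTri items) := by
  exact PySem.List.sorted2_perm _ _ _ _

lemma pvTri_idx_nodup (items : List (List Int)) :
    ((pvTri items).map (fun t => t.2.2)).Nodup := by
  unfold pvTri
  rw [List.map_map]
  have h2 : (List.map (fun p : Int × List Int => p.1 + 1)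
      (PySem.List.enumerate items 0)).Pairwise (· < ·) :=
    List.pairwise_map.mpr ((PySem.List.pairwise_lt_enumerate items 0).imp
      (fun {a b} hab => by omega))
  exact h2.imp (fun {a b} h => ne_of_lt h)

lemma pvTriS_idx_nodup (items : List (List Int)) :
    ((pvTriS items).map (fun t => t.2.2)).Nodup := by
  exact (((pvTriS_perm items).map _).nodup_iff).mpr (pvTri_idx_nodup items)

def pvStep2 (m y : Int × Int) : Int × Int :=
  if (decide (y.1 < m.1) || (!decide (m.1 < y.1) && decide (y.2 < m.2))) = true then y else m

lemma pvLex_resolve (a b c : Int × Int) : ¬ pvLex a b → ¬ pvLex b c → ¬ pvLex a c := by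
  unfold pvLex; omega

lemma pvLex_antisymm (a b : Int × Int) : ¬ pvLex a b → ¬ pvLex b a → a = b := by
  obtain ⟨a1, a2⟩ := a; obtain ⟨b1, b2⟩ := b
  unfold pvLex
  intro h1 h2
  simp only [Prod.mk.injEq]
  omega

lemma pvMin2_cons (x : Int × Int) (l : List (Int × Int)) :
    PySem.List.min2? (x :: l) (fun p => p.1) (fun p => p.2) = some (l.foldl pvStep2 x) := by
  unfold PySem.List.min2?
  simp only [List.foldl_cons]
  induction l generalizing x with
  | nil => rfl
  | cons y ys ih =>
    simp only [List.foldl_cons]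
    rw [show (if (decide (y.1 < x.1) || (!decide (x.1 < y.1) && decide (y.2 < x.2))) = true
        then some y else some x) = some (pvStep2 x y) by unfold pvStep2; split <;> simp_all]
    exact ih (pvStep2 x y)

lemma pvStep2_or (m y : Int × Int) : pvStep2 m y = m ∨ pvStep2 m y = y := by
  unfold pvStep2; split
  · exact Or.inr rfl
  · exact Or.inl rfl

lemma pvStep2_cond (m y : Int × Int) : ¬ pvLex m (pvStep2 m y) ∧ ¬ pvLex y (pvStep2 m y) := by
  unfold pvStep2 pvLex
  split <;> rename_i h <;>
    simp only [Bool.or_eq_true, Bool.and_eq_true, Bool.not_eq_true', decide_eq_true_eq,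
      decide_eq_false_iff_not, Bool.or_eq_false_iff, Bool.and_eq_false_iff,
      Bool.not_eq_false'] at h <;> omega

lemma pvFoldl_spec : ∀ (l : List (Int × Int)) (x : Int × Int),
    (l.foldl pvStep2 x = x ∨ l.foldl pvStep2 x ∈ l) ∧
      ∀ y, (y = x ∨ y ∈ l) → ¬ pvLex y (l.foldl pvStep2 x) := by
  intro l
  induction l with
  | nil =>
    intro x
    simp only [List.foldl_nil]
    refine ⟨by simp, ?_⟩
    rintro y (rfl | hy)
    · unfold pvLex; omega
    · simp at hy
  | cons y ys ih =>
    intro x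
    simp only [List.foldl_cons]
    obtain ⟨ihm, ihmin⟩ := ih (pvStep2 x y)
    constructor
    · rcases ihm with h | h
      · rcases pvStep2_or x y with h2 | h2 <;> rw [h, h2]
        · exact Or.inl rfl
        · exact Or.inr (List.mem_cons_self)
      · exact Or.inr (List.mem_cons_of_mem _ h)
    · rintro z (rfl | hz)
      · exact pvLex_resolve _ _ _ (pvStep2_cond z y).1 (ihmin _ (Or.inl rfl))
      · rcases List.mem_cons.mp hz with rfl | hz'
        · exact pvLex_resolve _ _ _ (pvStep2_cond x z).2 (ihmin _ (Or.inl rfl))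
        · exact ihmin z (Or.inr hz')

-- min2? on Int pairs: a min2?-result is a member no element lexicographically undercuts
lemma pvMin2_spec (l : List (Int × Int)) (m : Int × Int)
    (h : PySem.List.min2? l (fun p => p.1) (fun p => p.2) = some m) :
    m ∈ l ∧ ∀ y ∈ l, ¬ pvLex y m := by
  cases l with
  | nil => simp [PySem.List.min2?] at h
  | cons x t =>
    rw [pvMin2_cons] at h
    obtain rfl : t.foldl pvStep2 x = m := by injection h
    obtain ⟨hm, hmin⟩ := pvFoldl_spec t x
    refine ⟨?_, ?_⟩
    · rcases hm with h' | h'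
      · rw [h']; exact List.mem_cons_self
      · exact List.mem_cons_of_mem _ h'
    · intro y hy
      rcases List.mem_cons.mp hy with rfl | hy'
      · exact hmin y (Or.inl rfl)
      · exact hmin y (Or.inr hy')

lemma pvMin2_none_iff (l : List (Int × Int)) :
    PySem.List.min2? l (fun p => p.1) (fun p => p.2) = none ↔ l = [] := by
  cases l with
  | nil => simp [PySem.List.min2?]
  | cons x t => rw [pvMin2_cons]; simp

lemma pvMin2_perm (l l' : List (Int × Int)) (hp : l.Perm l') :
    PySem.List.min2? l (fun p => p.1) (fun p => p.2)
      = PySem.List.min2? l' (fun p => p.1) (fun p => p.2) := by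
  cases hl : PySem.List.min2? l (fun p => p.1) (fun p => p.2) with
  | none =>
    have : l = [] := (pvMin2_none_iff l).mp hl
    subst this
    rw [(pvMin2_none_iff l').mpr hp.symm.eq_nil]
  | some m =>
    cases hl' : PySem.List.min2? l' (fun p => p.1) (fun p => p.2) with
    | none =>
      have : l' = [] := (pvMin2_none_iff l').mp hl'
      subst this
      simp [hp.eq_nil, PySem.List.min2?] at hl
    | some m' =>
      obtain ⟨hm, hmin⟩ := pvMin2_spec l m hl
      obtain ⟨hm', hmin'⟩ := pvMin2_spec l' m' hl'
      exact congrArg some (pvLex_antisymm m m'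
        (hmin' m (hp.subset hm)) (hmin m' (hp.symm.subset hm')))

def pvPick (bb : Int × Int) (p : Int × List Int) : Int × Int :=
  if bb.1 == -1 || decide (PySem.List.pyGetD p.2 0 0 > bb.2) then
    (p.1, PySem.List.pyGetD p.2 0 0)
  else bb

def pvKey (p : Int × List Int) : Int × Int := (-(PySem.List.pyGetD p.2 0 0), p.1 + 1)

def pvCondB (used : List Bool) (h : Int) (p : Int × List Int) : Bool :=
  !(PySem.List.pyGetD used p.1 false) && decide (h - PySem.List.pyGetD p.2 1 0 ≥ 100)

lemma pvScan_eq (items : List (List Int)) (used : List Bool) (h : Int) :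
    pvScan items used h =
      ((PySem.List.enumerate items).filter (pvCondB used h)).foldl pvPick (-1, 0) := by
  unfold pvScan
  exact PySem.List.foldl_if_eq_foldl_filter (pvCondB used h) pvPick _ _

lemma enumerate_fst_nonneg (items : List (List Int)) (p : Int × List Int)
    (hp : p ∈ PySem.List.enumerate items) : 0 ≤ p.1 := by
  rcases (PySem.List.mem_enumerate_iff items 0 p).mp hp with ⟨k, hk, rfl⟩
  simp

lemma pvScanAux : ∀ (c : List (Int × List Int)) (j a : Int), 0 ≤ j →
    (∀ q ∈ c, j < q.1) → c.Pairwise (fun x y => x.1 < y.1) →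
    c.foldl pvPick (j, a) =
      (((c.map pvKey).foldl pvStep2 (-a, j + 1)).2 - 1,
        -((c.map pvKey).foldl pvStep2 (-a, j + 1)).1) := by
  intro c
  induction c with
  | nil =>
    intro j a hj _ _
    simp only [List.foldl_nil, List.map_nil]
    simp only [Prod.mk.injEq]
    omega
  | cons q rest ih =>
    intro j a hj hlt hpw
    rcases List.pairwise_cons.mp hpw with ⟨hqr, hrest⟩
    have hjq : j < q.1 := hlt q List.mem_cons_self
    simp only [List.foldl_cons, List.map_cons]
    have hne : (j == -1) = false := by simp; omega
    have hkey : pvStep2 (-a, j + 1) (pvKey q) =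
        if PySem.List.pyGetD q.2 0 0 > a then pvKey q else (-a, j + 1) := by
      unfold pvStep2 pvKey
      by_cases hgt : PySem.List.pyGetD q.2 0 0 > a
      · rw [if_pos hgt, if_pos]
        simp only [Bool.or_eq_true, decide_eq_true_eq]
        left; omega
      · rw [if_neg hgt, if_neg]
        simp only [Bool.or_eq_true, Bool.and_eq_true, Bool.not_eq_true',
          decide_eq_true_eq, decide_eq_false_iff_not]
        omega
    by_cases hgt : PySem.List.pyGetD q.2 0 0 > a
    · rw [show pvPick (j, a) q = (q.1, PySem.List.pyGetD q.2 0 0) by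
        unfold pvPick; simp [hne, hgt]]
      rw [hkey, if_pos hgt]
      rw [show pvKey q = (-(PySem.List.pyGetD q.2 0 0), q.1 + 1) from rfl]
      exact ih q.1 (PySem.List.pyGetD q.2 0 0) (by omega) hqr hrest
    · rw [show pvPick (j, a) q = (j, a) by unfold pvPick; simp [hne, hgt]]
      rw [hkey, if_neg hgt]
      exact ih j a hj (fun r hr => lt_trans hjq (hqr r hr)) hrest

-- the scan of B equals the min2? (heap-pop) of the corresponding (-attack, idx) pairs
lemma pvScan_spec (items : List (List Int)) (used : List Bool) (h : Int) :
    pvScan items used h =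
      match PySem.List.min2?
          (((PySem.List.enumerate items).filter
              (fun p => !(PySem.List.pyGetD used p.1 false)
                && decide (h - PySem.List.pyGetD p.2 1 0 ≥ 100))).map
            (fun p => (-(PySem.List.pyGetD p.2 0 0), p.1 + 1)))
          (fun p => p.1) (fun p => p.2) with
      | none => (-1, 0)
      | some m => (m.2 - 1, -m.1) := by
  rw [pvScan_eq]
  rw [show ((PySem.List.enumerate items).filter
      (fun p => !(PySem.List.pyGetD used p.1 false)
        && decide (h - PySem.List.pyGetD p.2 1 0 ≥ 100))) =
      ((PySem.List.enumerate items).filter (pvCondB used h)) from rfl]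
  rw [show (fun p : Int × List Int => (-(PySem.List.pyGetD p.2 0 0), p.1 + 1)) = pvKey from rfl]
  cases hc : (PySem.List.enumerate items).filter (pvCondB used h) with
  | nil => simp [PySem.List.min2?]
  | cons q rest =>
    have hmemq : q ∈ PySem.List.enumerate items :=
      List.mem_of_mem_filter (hc ▸ List.mem_cons_self)
    have hq0 : 0 ≤ q.1 := enumerate_fst_nonneg items q hmemq
    have hpw : (q :: rest).Pairwise (fun x y : Int × List Int => x.1 < y.1) :=
      hc ▸ (PySem.List.pairwise_lt_enumerate items 0).filter _
    rcases List.pairwise_cons.mp hpw with ⟨hqr, hrest⟩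
    simp only [List.foldl_cons, List.map_cons]
    rw [pvMin2_cons]
    rw [show pvPick (-1, 0) q = (q.1, PySem.List.pyGetD q.2 0 0) by unfold pvPick; simp]
    rw [show pvKey q = (-(PySem.List.pyGetD q.2 0 0), q.1 + 1) from rfl]
    exact pvScanAux rest q.1 (PySem.List.pyGetD q.2 0 0) hq0 hqr hrest

lemma erase_eq_filter_of_nodup_snd (l : List (Int × Int)) (m : Int × Int)
    (hn : (l.map Prod.snd).Nodup) (hm : m ∈ l) :
    l.erase m = l.filter (fun y => decide (y.2 ≠ m.2)) := by
  induction l with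
  | nil => simp at hm
  | cons x l ih =>
    have hn' := hn
    rw [List.map_cons, List.nodup_cons] at hn'
    obtain ⟨hx, hl⟩ := hn'
    by_cases hxm : x = m
    · subst hxm
      rw [List.erase_cons_head]
      rw [List.filter_cons]
      simp only [decide_eq_true_eq, ne_eq, not_true_eq_false, decide_false]
      rw [List.filter_eq_self.mpr ?_]
      · simp
      · intro y hy
        have : x.2 ≠ y.2 := fun he => hx (he ▸ List.mem_map_of_mem hy)
        simp [this.symm]
    · have hm' : m ∈ l := by
        rcases List.mem_cons.mp hm with rfl | hm'
        · exact absurd rfl hxm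
        · exact hm'
      have hne : x.2 ≠ m.2 := fun he => hx (he ▸ List.mem_map_of_mem hm')
      rw [List.erase_cons_tail (by simp [hxm])]
      rw [List.filter_cons]
      simp only [hne, decide_eq_true_eq, ne_eq, not_false_eq_true, decide_true, if_true]
      rw [ih (by simpa [List.Nodup] using hl) hm']

lemma pyGetD_false (n : Nat) (i : Int) :
    PySem.List.pyGetD (List.replicate n false) i false = false := by
  unfold PySem.List.pyGetD
  cases h : PySem.List.pyGet? (List.replicate n false) i with
  | none => rfl
  | some v =>
    have hv : v ∈ List.replicate n false := by
      unfold PySem.List.pyGet? at h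
      rcases Option.bind_eq_some_iff.mp h with ⟨k, -, hk⟩
      exact List.mem_of_getElem? hk
    simp only [List.eq_of_mem_replicate hv, Option.getD_some]

lemma pvTri_mem (items : List (List Int)) (t : Int × Int × Int) (ht : t ∈ pvTri items) :
    ∃ k : Nat, k < items.length ∧ t.2.2 = ((k : Nat) : Int) + 1 := by
  unfold pvTri at ht
  rcases List.mem_map.mp ht with ⟨p, hp, rfl⟩
  rcases (PySem.List.mem_enumerate_iff items 0 p).mp hp with ⟨k, hk, rfl⟩
  exact ⟨k, hk, by simp⟩

-- the main loop correspondence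
lemma pvMain (items : List (List Int)) :
    ∀ (hs : List Int) (P : Int × Int × Int → Bool) (dq : List (Int × Int × Int))
      (heap : List (Int × Int)) (used : List Bool) (ans : List Int),
      hs.Pairwise (· ≤ ·) →
      (∀ h ∈ hs, ∀ t, P t = true → h - t.1 ≥ 100) →
      dq = (pvTriS items).filter (fun t => !P t) →
      heap.Perm (((pvTriS items).filter (fun t => P t && pvAvail used t)).map pvNeg) →
      (∀ t ∈ pvTriS items, pvAvail used t = false → P t = true) →
      used.length = items.length →
      (hs.foldl pvStepA (dq, heap, ans)).2.2 = (hs.foldl (pvStepB items) (used, ans)).2 := by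
  intro hs
  induction hs with
  | nil => intro P dq heap used ans _ _ _ _ _ _; rfl
  | cons h hs ih =>
    intro P dq heap used ans hpw hmono hdq hheap hinv5 hlen
    rcases List.pairwise_cons.mp hpw with ⟨hhle, hpw'⟩
    simp only [List.foldl_cons]
    have htpc : (pvTriS items).Pairwise (fun a b => a.1 ≤ b.1) := pvTriS_pairwise_cost items
    have hPaff : ∀ t ∈ pvTriS items, P t = true → pvAff h t = true := by
      intro t _ hPt
      simp only [pvAff, decide_eq_true_eq]
      exact hmono h List.mem_cons_self t hPt
    have hspan := span_filter (pvAff h) (fun a b : Int × Int × Int => a.1 ≤ b.1)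
        (by intro a b hab hpb; simp only [pvAff, decide_eq_true_eq] at *; omega) dq
        (hdq ▸ htpc.filter _)
    have hdq' : dq.dropWhile (pvAff h) = (pvTriS items).filter (fun t => !pvAff h t) := by
      rw [hspan.2, hdq, List.filter_filter]
      refine List.filter_congr ?_
      intro t htm
      cases hPt : P t
      · simp
      · simp [hPaff t htm hPt]
    have hseg : dq.takeWhile (pvAff h) = (pvTriS items).filter (fun t => pvAff h t && !P t) := by
      rw [hspan.1, hdq, List.filter_filter]
    have e1 : ((pvTriS items).filter (fun t => pvAff h t && pvAvail used t)).filter P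
        = (pvTriS items).filter (fun t => P t && pvAvail used t) := by
      rw [List.filter_filter]
      refine List.filter_congr ?_
      intro t htm
      cases hPt : P t
      · simp
      · simp [hPaff t htm hPt]
    have e2 : ((pvTriS items).filter (fun t => pvAff h t && pvAvail used t)).filter (fun t => !P t)
        = (pvTriS items).filter (fun t => pvAff h t && !P t) := by
      rw [List.filter_filter]
      refine List.filter_congr ?_
      intro t htm
      cases hPt : P t
      · have hav : pvAvail used t = true := by
          cases hav : pvAvail used t
          · exact absurd (hinv5 t htm hav) (by simp [hPt])
          · rfl
        simp [hav]
      · simp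
    have hX : (heap ++ (dq.takeWhile (pvAff h)).map pvNeg).Perm
        (((pvTriS items).filter (fun t => pvAff h t && pvAvail used t)).map pvNeg) := by
      refine (hheap.append (show ((dq.takeWhile (pvAff h)).map pvNeg).Perm
        (((pvTriS items).filter (fun t => pvAff h t && !P t)).map pvNeg) by rw [hseg])).trans ?_
      rw [← e1, ← e2, ← List.map_append]
      exact (List.filter_append_perm P _).map pvNeg
    have hLB : ((PySem.List.enumerate items).filter (pvCondB used h)).map pvKey
        = ((pvTri items).filter (fun t => pvAff h t && pvAvail used t)).map pvNeg := by
      unfold pvTri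
      rw [List.filter_map, List.map_map]
      have hpred : ∀ p ∈ PySem.List.enumerate items, pvCondB used h p =
          ((fun t => pvAff h t && pvAvail used t) ∘ (fun p : Int × List Int =>
            (PySem.List.pyGetD p.2 1 0, PySem.List.pyGetD p.2 0 0, p.1 + 1))) p := by
        intro p _
        simp only [Function.comp, pvCondB, pvAff, pvAvail]
        rw [show p.1 + 1 - 1 = p.1 by omega]
        exact Bool.and_comm _ _
      rw [List.filter_congr hpred]
      rfl
    have hXLB : (((pvTriS items).filter (fun t => pvAff h t && pvAvail used t)).map pvNeg).Perm
        (((PySem.List.enumerate items).filter (pvCondB used h)).map pvKey) := by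
      rw [hLB]
      exact ((pvTriS_perm items).filter _).map pvNeg
    have hminB : PySem.List.min2? (heap ++ (dq.takeWhile (pvAff h)).map pvNeg)
          (fun p => p.1) (fun p => p.2)
        = PySem.List.min2? (((PySem.List.enumerate items).filter (pvCondB used h)).map pvKey)
          (fun p => p.1) (fun p => p.2) :=
      pvMin2_perm _ _ (hX.trans hXLB)
    have hscan : pvScan items used h =
        match PySem.List.min2? (heap ++ (dq.takeWhile (pvAff h)).map pvNeg)
            (fun p => p.1) (fun p => p.2) with
        | none => (-1, 0)
        | some m => (m.2 - 1, -m.1) := by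
      rw [pvScan_spec]
      rw [show (fun p : Int × List Int =>
          !PySem.List.pyGetD used p.1 false
            && decide (h - PySem.List.pyGetD p.2 1 0 ≥ 100)) = pvCondB used h from rfl]
      rw [show (fun p : Int × List Int =>
          (-PySem.List.pyGetD p.2 0 0, p.1 + 1)) = pvKey from rfl]
      rw [← hminB]
    have hstepA : pvStepA (dq, heap, ans) h =
        (match PySem.List.min2? (heap ++ (dq.takeWhile (pvAff h)).map pvNeg)
            (fun p => p.1) (fun p => p.2) with
         | none => (dq.dropWhile (pvAff h), heap ++ (dq.takeWhile (pvAff h)).map pvNeg, ans)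
         | some m => (dq.dropWhile (pvAff h),
             (heap ++ (dq.takeWhile (pvAff h)).map pvNeg).erase m, ans ++ [m.2])) := by
      simp only [pvStepA, pvPush_eq]
    have hmono' : ∀ h' ∈ hs, ∀ t, pvAff h t = true → h' - t.1 ≥ 100 := by
      intro h' hh' t haff
      simp only [pvAff, decide_eq_true_eq] at haff
      have := hhle h' hh'
      omega
    cases hm : PySem.List.min2? (heap ++ (dq.takeWhile (pvAff h)).map pvNeg)
        (fun p => p.1) (fun p => p.2) with
    | none =>
      rw [hstepA, hm]
      rw [show pvStepB items (used, ans) h = (used, ans) by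
        unfold pvStepB
        rw [hscan, hm]
        simp]
      exact ih (pvAff h) _ _ used ans hpw' hmono' hdq' hX
        (fun t htm hav => hPaff t htm (hinv5 t htm hav)) hlen
    | some m =>
      have hmem : m ∈ heap ++ (dq.takeWhile (pvAff h)).map pvNeg := (pvMin2_spec _ m hm).1
      have hmX : m ∈ ((pvTriS items).filter (fun t => pvAff h t && pvAvail used t)).map pvNeg :=
        hX.subset hmem
      rcases List.mem_map.mp hmX with ⟨u, hu, hum⟩
      have huT : u ∈ pvTriS items := List.mem_of_mem_filter hu
      have huaff : pvAff h u = true := by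
        have := (List.mem_filter.mp hu).2
        simp only [Bool.and_eq_true] at this
        exact this.1
      rcases pvTri_mem items u ((pvTriS_perm items).subset huT) with ⟨k, hk, hidx⟩
      have hm2 : m.2 = ((k : Nat) : Int) + 1 := by rw [← hum]; exact hidx
      have hnodupX : ((((pvTriS items).filter
          (fun t => pvAff h t && pvAvail used t)).map pvNeg).map Prod.snd).Nodup := by
        rw [List.map_map]
        exact List.Nodup.sublist (List.Sublist.map _ List.filter_sublist)
          (pvTriS_idx_nodup items)
      have heraseX : (((pvTriS items).filter
            (fun t => pvAff h t && pvAvail used t)).map pvNeg).erase m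
          = (((pvTriS items).filter (fun t => pvAff h t && pvAvail used t)).map pvNeg).filter
              (fun y => decide (y.2 ≠ m.2)) :=
        erase_eq_filter_of_nodup_snd _ m hnodupX hmX
      have hm21 : m.2 - 1 = ((k : Nat) : Int) := by omega
      have havail : ∀ t ∈ pvTriS items,
          pvAvail (PySem.List.pySetD used ((k : Nat) : Int) true) t
            = (pvAvail used t && decide (t.2.2 ≠ m.2)) := by
        intro t htm
        rcases pvTri_mem items t ((pvTriS_perm items).subset htm) with ⟨k', hk', hidx'⟩
        unfold pvAvail
        rw [hidx', show ((k' : Nat) : Int) + 1 - 1 = ((k' : Nat) : Int) by omega]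
        rw [PySem.List.pyGetD_pySetD_natCast used k k' true false (by omega)]
        by_cases hkk : k' = k
        · subst hkk
          rw [if_pos rfl]
          simp [hm2]
        · rw [if_neg hkk]
          have hne2 : ((k' : Nat) : Int) + 1 ≠ m.2 := by omega
          simp [hne2]
      have hheapnew : (((heap ++ (dq.takeWhile (pvAff h)).map pvNeg).erase m)).Perm
          (((pvTriS items).filter (fun t =>
            pvAff h t && pvAvail (PySem.List.pySetD used ((k : Nat) : Int) true) t)).map pvNeg) := by
        refine (List.Perm.erase m hX).trans ?_
        rw [heraseX, List.filter_map, List.filter_filter]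
        rw [List.filter_congr (q := fun t =>
          pvAff h t && pvAvail (PySem.List.pySetD used ((k : Nat) : Int) true) t) ?_]
        intro t htm
        show (decide ((pvNeg t).2 ≠ m.2) && (pvAff h t && pvAvail used t))
          = (pvAff h t && pvAvail (PySem.List.pySetD used ((k : Nat) : Int) true) t)
        rw [havail t htm]
        show (decide (t.2.2 ≠ m.2) && (pvAff h t && pvAvail used t))
          = (pvAff h t && (pvAvail used t && decide (t.2.2 ≠ m.2)))
        cases pvAff h t <;> cases pvAvail used t <;> cases decide (t.2.2 ≠ m.2) <;> rfl
      have hinv5new : ∀ t ∈ pvTriS items,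
          pvAvail (PySem.List.pySetD used ((k : Nat) : Int) true) t = false →
            pvAff h t = true := by
        intro t htm hav
        rw [havail t htm] at hav
        cases hav1 : pvAvail used t with
        | false => exact hPaff t htm (hinv5 t htm hav1)
        | true =>
          rw [hav1] at hav
          have ht2 : t.2.2 = m.2 := by
            by_contra hne
            simp [hne] at hav
          have htu : t = u :=
            List.inj_on_of_nodup_map (pvTriS_idx_nodup items) htm huT
              (by rw [ht2, ← hum]; rfl)
          rw [htu]; exact huaff
      have hlennew : (PySem.List.pySetD used ((k : Nat) : Int) true).length = items.length := by
        rw [PySem.List.length_pySetD]; exact hlen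
      rw [hstepA, hm]
      rw [show pvStepB items (used, ans) h =
          (PySem.List.pySetD used ((k : Nat) : Int) true, ans ++ [m.2]) by
        unfold pvStepB
        rw [hscan, hm]
        rw [if_pos (show m.2 - 1 ≠ -1 by omega)]
        show (PySem.List.pySetD used (m.2 - 1) true, ans ++ [m.2 - 1 + 1])
          = (PySem.List.pySetD used ((k : Nat) : Int) true, ans ++ [m.2])
        rw [hm21, show ((k : Nat) : Int) + 1 = m.2 by omega]]
      exact ih (pvAff h) _ _ _ _ hpw' hmono' hdq' hheapnew hinv5new hlennew


-- ===== VERDICT (by name: the statement is the Claim_ definition above) =====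
theorem solution_spec : Claim_equal_solution := by
  intro healths items _ _
  unfold Spec_solution
  simp only [solution, solution_alt]
  rw [pvMain items (PySem.List.sorted healths (fun x => x)) (fun _ => false)
    (pvTriS items) [] (List.replicate items.length false) []
    (PySem.List.sorted_pairwise healths (fun x => x))
    (by simp)
    (by simp)
    (by simp)
    (by intro t _ hav
        unfold pvAvail at hav
        rw [pyGetD_false] at hav
        simp at hav)
    (by simp)]
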